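-- pv_equiv track=rewrite | github.com/invarlock/invarlock | scripts/proof_packs/python/create_quant_rtn_model.py | _should_quantize
-- ===== SOURCE A (Python) =====
-- def _should_quantize(name: str, scope: str) -> bool:
--     name_lower = name.lower()
--     if scope == "all":
--         return "weight" in name_lower and any(
--             x in name_lower
--             for x in (
--                 "linear",
--                 "dense",
--                 "proj",
--                 "fc",
--                 "mlp",
--                 "attn",
--                 "wqkv",
--                 "query_key_value",
--             )
--         )
--     if scope == "ffn":
--         return "weight" in name_lower and any(
--             x in name_lower
--             for x in (
--                 "mlp",
--                 "fc",
--                 "dense",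
--                 "gate",
--                 "up_proj",
--                 "down_proj",
--                 "dense_h_to_4h",
--                 "dense_4h_to_h",
--             )
--         )
--     if scope == "attn":
--         return "weight" in name_lower and any(
--             x in name_lower
--             for x in (
--                 "attn",
--                 "q_proj",
--                 "k_proj",
--                 "v_proj",
--                 "o_proj",
--                 "wqkv",
--                 "out_proj",
--                 "query_key_value",
--             )
--         )
--     return False
-- ===== SOURCE B (Python) =====
-- # Inverted index: keyword -> scopes in which that keyword triggers quantization.
-- KEYWORD_SCOPES = (
--     ("linear", ("all",)),
--     ("dense", ("all", "ffn")),
--     ("proj", ("all",)),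
--     ("fc", ("all", "ffn")),
--     ("mlp", ("all", "ffn")),
--     ("attn", ("all", "attn")),
--     ("wqkv", ("all", "attn")),
--     ("query_key_value", ("all", "attn")),
--     ("gate", ("ffn",)),
--     ("up_proj", ("ffn",)),
--     ("down_proj", ("ffn",)),
--     ("dense_h_to_4h", ("ffn",)),
--     ("dense_4h_to_h", ("ffn",)),
--     ("q_proj", ("attn",)),
--     ("k_proj", ("attn",)),
--     ("v_proj", ("attn",)),
--     ("o_proj", ("attn",)),
--     ("out_proj", ("attn",)),
-- )
--
--
-- def _should_quantize(name: str, scope: str) -> bool: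
--     name_lower = name.lower()
--     if "weight" not in name_lower:
--         return False
--     return any(scope in scopes and kw in name_lower for kw, scopes in KEYWORD_SCOPES)
-- ===== Notes on version B (the rewrite author's own statement) =====
-- stated objective: alternative
-- what changed: Inverts the data layout: instead of an if/elif cascade that selects a per-scope keyword tuple and scans it, B scans a single flat keyword->scopes index once, testing for each keyword whether the scope applies and the keyword occurs, after an early 'weight' guard shared by all scopes.
import Mathlib
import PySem

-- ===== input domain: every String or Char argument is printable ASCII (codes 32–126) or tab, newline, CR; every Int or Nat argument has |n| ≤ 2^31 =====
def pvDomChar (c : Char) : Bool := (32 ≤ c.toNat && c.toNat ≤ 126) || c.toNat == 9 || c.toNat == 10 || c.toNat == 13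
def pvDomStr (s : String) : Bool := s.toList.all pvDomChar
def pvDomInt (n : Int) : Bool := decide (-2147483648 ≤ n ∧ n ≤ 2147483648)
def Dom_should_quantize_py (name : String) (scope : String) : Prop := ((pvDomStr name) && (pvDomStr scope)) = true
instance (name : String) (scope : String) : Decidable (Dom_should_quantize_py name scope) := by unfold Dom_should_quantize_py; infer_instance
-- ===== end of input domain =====

-- B inverts the data layout: instead of choosing a per-scope keyword tuple and scanning it,
-- it scans ONE flat keyword→scopes index and tests scope membership per keyword (alternative).

-- ===== PORT A =====  (literal transliteration of _should_quantize)
def should_quantize_py (name : String) (scope : String) : Bool :=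
  let name_lower := PySem.Str.lower name
  if scope == "all" then
    PySem.Str.isIn "weight" name_lower &&
      (["linear", "dense", "proj", "fc", "mlp", "attn", "wqkv", "query_key_value"].any
        (fun x => PySem.Str.isIn x name_lower))
  else if scope == "ffn" then
    PySem.Str.isIn "weight" name_lower &&
      (["mlp", "fc", "dense", "gate", "up_proj", "down_proj", "dense_h_to_4h", "dense_4h_to_h"].any
        (fun x => PySem.Str.isIn x name_lower))
  else if scope == "attn" then
    PySem.Str.isIn "weight" name_lower &&
      (["attn", "q_proj", "k_proj", "v_proj", "o_proj", "wqkv", "out_proj", "query_key_value"].any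
        (fun x => PySem.Str.isIn x name_lower))
  else
    false

-- ===== PORT B =====  (literal transliteration of Source B)
def pvKeywordScopes : List (String × List String) :=
  [("linear", ["all"]),
   ("dense", ["all", "ffn"]),
   ("proj", ["all"]),
   ("fc", ["all", "ffn"]),
   ("mlp", ["all", "ffn"]),
   ("attn", ["all", "attn"]),
   ("wqkv", ["all", "attn"]),
   ("query_key_value", ["all", "attn"]),
   ("gate", ["ffn"]),
   ("up_proj", ["ffn"]),
   ("down_proj", ["ffn"]),
   ("dense_h_to_4h", ["ffn"]),
   ("dense_4h_to_h", ["ffn"]),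
   ("q_proj", ["attn"]),
   ("k_proj", ["attn"]),
   ("v_proj", ["attn"]),
   ("o_proj", ["attn"]),
   ("out_proj", ["attn"])]

def should_quantize_py_alt (name : String) (scope : String) : Bool :=
  let name_lower := PySem.Str.lower name
  if PySem.Str.isIn "weight" name_lower = false then false
  else
    pvKeywordScopes.any (fun p => p.2.contains scope && PySem.Str.isIn p.1 name_lower)

-- ===== PRECONDITION & SPEC =====
def Spec_should_quantize_py (name : String) (scope : String) (out : Bool) : Prop := out = should_quantize_py_alt name scope
instance (name : String) (scope : String) (out : Bool) : Decidable (Spec_should_quantize_py name scope out) := by unfold Spec_should_quantize_py; infer_instance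

-- ===== CLAIM (what is proved, stated in full; the proofs are below) =====
def Claim_equal_should_quantize_py : Prop := ∀ (name : String) (scope : String), Dom_should_quantize_py name scope → Spec_should_quantize_py name scope (should_quantize_py name scope)

-- ===== LEMMAS AND PROOFS =====

-- Each lemma: A's per-scope test (shared "weight" guard && scoped keyword scan) equals
-- B's one-pass scan of the inverted keyword→scopes index, for ANY per-keyword predicate f.
theorem pv_branch_all (f : String → Bool) :
    (f "weight" && (["linear", "dense", "proj", "fc", "mlp", "attn", "wqkv",
        "query_key_value"] : List String).any f)
    = (if f "weight" = false then false
       else pvKeywordScopes.any (fun p => p.2.contains "all" && f p.1)) := by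
  simp [pvKeywordScopes]

theorem pv_branch_ffn (f : String → Bool) :
    (f "weight" && (["mlp", "fc", "dense", "gate", "up_proj", "down_proj",
        "dense_h_to_4h", "dense_4h_to_h"] : List String).any f)
    = (if f "weight" = false then false
       else pvKeywordScopes.any (fun p => p.2.contains "ffn" && f p.1)) := by
  simp [pvKeywordScopes]
  cases f "weight" <;> simp
  ac_rfl

theorem pv_branch_attn (f : String → Bool) :
    (f "weight" && (["attn", "q_proj", "k_proj", "v_proj", "o_proj", "wqkv",
        "out_proj", "query_key_value"] : List String).any f)
    = (if f "weight" = false then false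
       else pvKeywordScopes.any (fun p => p.2.contains "attn" && f p.1)) := by
  simp [pvKeywordScopes]
  cases f "weight" <;> simp
  ac_rfl

-- ===== VERDICT (by name: the statement is the Claim_ definition above) =====
theorem should_quantize_py_spec : Claim_equal_should_quantize_py := by
  intro name scope _
  unfold Spec_should_quantize_py should_quantize_py should_quantize_py_alt
  by_cases h1 : scope = "all"
  · subst h1
    exact (pv_branch_all (fun x => PySem.Str.isIn x (PySem.Str.lower name))).symm ▸ rfl
  · by_cases h2 : scope = "ffn"
    · subst h2
      exact (pv_branch_ffn (fun x => PySem.Str.isIn x (PySem.Str.lower name))).symm ▸ rfl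
    · by_cases h3 : scope = "attn"
      · subst h3
        exact (pv_branch_attn (fun x => PySem.Str.isIn x (PySem.Str.lower name))).symm ▸ rfl
      · simp [pvKeywordScopes, h1, h2, h3]
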